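-- pv_equiv track=rewrite | github.com/valerkahere/PropertyManagerOS | auto_resolve.py | match_faq_template
-- ===== SOURCE A (Python) =====
-- FAQ_FALLBACK_PATTERNS = {
--     "wifi": ["wifi", "wi-fi", "internet password", "broadband"],
--     "bin_collection": ["bin", "recycling", "waste collection"],
--     "parking": ["parking permit", "parking fob", "parking"],
--     "direct_debit": ["direct debit", "mandate", "standing order"],
--     "move_in_checklist": ["move in", "move-in", "key collection", "checklist"],
-- }
--
-- def _content_text(subject: str, body: str) -> str:
--     return f"{subject or ''}\n{body or ''}".lower()
--
-- def match_faq_template(subject: str, body: str, templates: dict) -> str | None: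
--     text = _content_text(subject, body)
--
--     patterns_by_template: dict[str, list[str]] = {}
--     for template_id, payload in templates.items():
--         if not isinstance(payload, dict):
--             continue
--         patterns = payload.get("patterns")
--         if not isinstance(patterns, list):
--             continue
--         normalized = [str(p).lower().strip() for p in patterns if str(p).strip()]
--         if normalized:
--             patterns_by_template[template_id] = normalized
--
--     if not patterns_by_template:
--         patterns_by_template = FAQ_FALLBACK_PATTERNS
--
--     for template_id, patterns in patterns_by_template.items():
--         if any(pattern in text for pattern in patterns):
--             return template_id
--
--     return None
-- ===== SOURCE B (Python) =====
-- FAQ_FALLBACK_PATTERNS = {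
--     "wifi": ["wifi", "wi-fi", "internet password", "broadband"],
--     "bin_collection": ["bin", "recycling", "waste collection"],
--     "parking": ["parking permit", "parking fob", "parking"],
--     "direct_debit": ["direct debit", "mandate", "standing order"],
--     "move_in_checklist": ["move in", "move-in", "key collection", "checklist"],
-- }
--
-- # fallback flattened to (key, pattern) pairs, scanned pattern-by-pattern
-- _FALLBACK_FLAT = [(k, p) for k, ps in FAQ_FALLBACK_PATTERNS.items() for p in ps]
--
--
-- def _scan_payload(payload, text):
--     """Lazily walk one payload's patterns: return (matched, saw_valid_pattern)
--     without ever materializing the normalized list; stops at the first hit."""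
--     if not isinstance(payload, dict):
--         return (False, False)
--     patterns = payload.get("patterns")
--     if not isinstance(patterns, list):
--         return (False, False)
--     saw = False
--     for p in patterns:
--         if str(p).strip():
--             saw = True
--             if str(p).lower().strip() in text:
--                 return (True, True)
--     return (False, saw)
--
--
-- def match_faq_template(subject, body, templates):
--     text = "{}\n{}".format(subject or "", body or "").lower()
--     any_valid = False
--     for template_id, payload in templates.items():
--         matched, saw = _scan_payload(payload, text)
--         if matched:
--             return template_id
--         any_valid = any_valid or saw
--     if not any_valid:
--         for key, pattern in _FALLBACK_FLAT:
--             if pattern in text: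
--                 return key
--     return None
-- ===== Notes on version B (the rewrite author's own statement) =====
-- stated objective: alternative
-- what changed: Replaced A's staged design (materialize a dict of normalized pattern lists, then re-scan it against a nested fallback table) with a single lazy pass that normalizes and tests each pattern on the fly with early exit and no intermediate lists, tracking validity in a flag, and a pre-flattened (key, pattern) fallback list scanned pair by pair.
import Mathlib
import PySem

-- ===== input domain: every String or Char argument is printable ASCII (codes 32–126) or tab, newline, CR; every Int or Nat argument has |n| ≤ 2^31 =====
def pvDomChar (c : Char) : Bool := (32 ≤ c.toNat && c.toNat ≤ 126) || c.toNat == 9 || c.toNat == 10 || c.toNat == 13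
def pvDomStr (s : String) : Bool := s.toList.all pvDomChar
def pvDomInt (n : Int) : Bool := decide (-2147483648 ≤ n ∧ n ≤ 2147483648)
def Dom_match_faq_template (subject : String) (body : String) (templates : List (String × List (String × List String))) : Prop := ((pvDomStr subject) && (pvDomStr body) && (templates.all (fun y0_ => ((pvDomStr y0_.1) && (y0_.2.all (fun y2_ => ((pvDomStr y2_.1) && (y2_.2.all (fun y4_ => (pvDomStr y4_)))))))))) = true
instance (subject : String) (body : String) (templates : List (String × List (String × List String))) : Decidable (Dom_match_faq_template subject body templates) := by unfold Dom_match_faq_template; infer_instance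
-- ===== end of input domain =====

-- B replaces A's staged design (materialize a dict of normalized pattern lists, then
-- re-scan it, with a nested fallback table) by a single lazy pass that tests each
-- pattern as it is normalized (early exit, no intermediate lists) plus a FLATTENED
-- (key, pattern) fallback table scanned pair by pair; return values proved equal.

-- ===== PORT A =====
-- text = f"{subject or ''}\n{body or ''}".lower()  ('s or ""' is s itself for a str)
def pvTextA (subject : String) (body : String) : List Char :=
  PySem.Chars.lower (subject.toList ++ '\n' :: body.toList)

def pvFallbackA : List (String × List String) :=
  [("wifi", ["wifi", "wi-fi", "internet password", "broadband"]),
   ("bin_collection", ["bin", "recycling", "waste collection"]),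
   ("parking", ["parking permit", "parking fob", "parking"]),
   ("direct_debit", ["direct debit", "mandate", "standing order"]),
   ("move_in_checklist", ["move in", "move-in", "key collection", "checklist"])]

-- [str(p).lower().strip() for p in patterns if str(p).strip()]  (p is already a str here)
def pvNormA (patterns : List String) : List String :=
  patterns.foldl (fun acc p =>
    if PySem.Str.strip p ≠ "" then acc ++ [PySem.Str.strip (PySem.Str.lower p)] else acc) []

-- the final 'for template_id, patterns in …: if any(pattern in text …): return template_id'
def pvScanA (text : List Char) : List (String × List String) → Option String
  | [] => none
  | (tid, pats) :: rest =>
      if pats.any (fun p => PySem.Chars.isIn p.toList text) then some tid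
      else pvScanA text rest

-- one iteration of A's first loop: validate the payload, normalize, store if non-empty
-- (the isinstance checks of A are identically true under the declared types and are dropped)
def pvStepA (d : PySem.Dict String (List String)) (tp : String × List (String × List String)) : PySem.Dict String (List String) :=
  match (PySem.Dict.mk tp.2).get? "patterns" with
  | none => d
  | some patterns =>
      let normalized := pvNormA patterns
      if normalized ≠ [] then d.insert tp.1 normalized else d

def match_faq_template (subject : String) (body : String) (templates : List (String × List (String × List String))) : Option String :=
  let text := pvTextA subject body
  let d : PySem.Dict String (List String) := templates.foldl pvStepA PySem.Dict.empty
  let items := if d.items = [] then pvFallbackA else d.items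
  pvScanA text items

-- ===== PORT B =====
-- _FALLBACK_FLAT = [(k, p) for k, ps in FAQ_FALLBACK_PATTERNS.items() for p in ps]
def pvFallbackFlatB : List (String × String) :=
  [("wifi", "wifi"), ("wifi", "wi-fi"), ("wifi", "internet password"), ("wifi", "broadband"),
   ("bin_collection", "bin"), ("bin_collection", "recycling"), ("bin_collection", "waste collection"),
   ("parking", "parking permit"), ("parking", "parking fob"), ("parking", "parking"),
   ("direct_debit", "direct debit"), ("direct_debit", "mandate"), ("direct_debit", "standing order"),
   ("move_in_checklist", "move in"), ("move_in_checklist", "move-in"),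
   ("move_in_checklist", "key collection"), ("move_in_checklist", "checklist")]

-- the for-loop of _scan_payload: lazy normalize-and-test, early exit, carries 'saw'
def pvScanPatsB (text : List Char) : List String → Bool → Bool × Bool
  | [], saw => (false, saw)
  | p :: rest, saw =>
      if PySem.Str.strip p ≠ "" then
        if PySem.Chars.isIn (PySem.Str.strip (PySem.Str.lower p)).toList text then (true, true)
        else pvScanPatsB text rest true
      else pvScanPatsB text rest saw

-- _scan_payload(payload, text)  (isinstance checks identically true under the declared types)
def pvScanPayloadB (payload : List (String × List String)) (text : List Char) : Bool × Bool :=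
  match (PySem.Dict.mk payload).get? "patterns" with
  | none => (false, false)
  | some patterns => pvScanPatsB text patterns false

-- 'for key, pattern in _FALLBACK_FLAT: if pattern in text: return key'
def pvFlatScanB (text : List Char) : List (String × String) → Option String
  | [] => none
  | (key, pat) :: rest =>
      if PySem.Chars.isIn pat.toList text then some key else pvFlatScanB text rest

-- the main loop with its any_valid accumulator
def pvGoB (text : List Char) : List (String × List (String × List String)) → Bool → Option String
  | [], anyValid => if anyValid then none else pvFlatScanB text pvFallbackFlatB
  | tp :: rest, anyValid =>
      let ms := pvScanPayloadB tp.2 text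
      if ms.1 then some tp.1 else pvGoB text rest (anyValid || ms.2)

def match_faq_template_alt (subject : String) (body : String) (templates : List (String × List (String × List String))) : Option String :=
  pvGoB (PySem.Chars.lower (subject.toList ++ '\n' :: body.toList)) templates false

-- ===== PRECONDITION & SPEC =====
-- Pre_ excludes association lists with duplicate template ids: those represent no Python
-- dict (A's argument is a dict, whose keys are unique), so A's overwrite-in-place behaviour
-- on them is unspecified.
def Pre_match_faq_template (subject : String) (body : String) (templates : List (String × List (String × List String))) : Prop :=
  (templates.map Prod.fst).Nodup
instance (subject : String) (body : String) (templates : List (String × List (String × List String))) : Decidable (Pre_match_faq_template subject body templates) := by unfold Pre_match_faq_template; infer_instance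

def pvWitness_match_faq_template : String × String × (List (String × List (String × List String))) :=
  ("Need WIFI help", "what is the wifi password", [("t1", [("patterns", [" WiFi "])]), ("t2", [])])

def Spec_match_faq_template (subject : String) (body : String) (templates : List (String × List (String × List String))) (out : Option String) : Prop := out = match_faq_template_alt subject body templates
instance (subject : String) (body : String) (templates : List (String × List (String × List String))) (out : Option String) : Decidable (Spec_match_faq_template subject body templates out) := by unfold Spec_match_faq_template; infer_instance

-- ===== CLAIM (what is proved, stated in full; the proofs are below) =====
def Claim_equal_match_faq_template : Prop := ∀ (subject : String) (body : String) (templates : List (String × List (String × List String))), Dom_match_faq_template subject body templates → Pre_match_faq_template subject body templates → Spec_match_faq_template subject body templates (match_faq_template subject body templates)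

-- ===== LEMMAS AND PROOFS =====

-- filterMap form of A's normalization
def pvNormF (patterns : List String) : List String :=
  patterns.filterMap (fun p =>
    if PySem.Str.strip p = "" then none else some (PySem.Str.strip (PySem.Str.lower p)))

theorem pvNorm_eq (patterns : List String) : pvNormA patterns = pvNormF patterns := by
  unfold pvNormA pvNormF
  suffices h : ∀ acc, patterns.foldl (fun acc p =>
      if PySem.Str.strip p ≠ "" then acc ++ [PySem.Str.strip (PySem.Str.lower p)] else acc) acc
      = acc ++ patterns.filterMap (fun p =>
      if PySem.Str.strip p = "" then none else some (PySem.Str.strip (PySem.Str.lower p))) by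
    simpa using h []
  induction patterns with
  | nil => simp
  | cons p rest ih =>
      intro acc
      rw [List.foldl_cons, List.filterMap_cons]
      by_cases hp : PySem.Str.strip p = ""
      · rw [if_neg (by simp [hp]), ih, if_pos hp]
      · rw [if_pos (show PySem.Str.strip p ≠ "" from hp), ih, if_neg hp]
        simp

-- B's lazy pattern scan computes 'any match over the normalized list' and 'list non-empty'
theorem pvScanPats_eq (text : List Char) (pats : List String) :
    ∀ saw, pvScanPatsB text pats saw =
      ((pvNormF pats).any (fun q => PySem.Chars.isIn q.toList text),
       saw || !(pvNormF pats).isEmpty) := by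
  induction pats with
  | nil => intro saw; simp [pvScanPatsB, pvNormF]
  | cons p rest ih =>
      intro saw
      by_cases hp : PySem.Str.strip p = ""
      · have hF : pvNormF (p :: rest) = pvNormF rest := by
          simp [pvNormF, List.filterMap_cons, hp]
        rw [hF, pvScanPatsB, if_neg (by simp [hp]), ih saw]
      · have hF : pvNormF (p :: rest)
            = PySem.Str.strip (PySem.Str.lower p) :: pvNormF rest := by
          simp [pvNormF, List.filterMap_cons, hp]
        rw [hF, pvScanPatsB, if_pos (show PySem.Str.strip p ≠ "" from hp)]
        cases hm : PySem.Chars.isIn (PySem.Str.strip (PySem.Str.lower p)).toList text with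
        | true =>
            rw [if_pos rfl]
            simp only [List.any_cons, List.isEmpty_cons, hm, Bool.true_or, Bool.or_true,
              Bool.not_false]
        | false =>
            rw [if_neg (by simp), ih true]
            simp only [List.any_cons, List.isEmpty_cons, hm, Bool.false_or, Bool.or_true,
              Bool.true_or, Bool.not_false]

-- the entry A's first loop contributes for one template, as an Option
def pvEntryA (tp : String × List (String × List String)) : Option (String × List String) :=
  match (PySem.Dict.mk tp.2).get? "patterns" with
  | none => none
  | some patterns =>
      let n := pvNormA patterns
      if n = [] then none else some (tp.1, n)

-- the valid templates, in order, as a plain list (the contents of A's dict)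
def pvPhase1 (templates : List (String × List (String × List String))) : List (String × List String) :=
  templates.filterMap pvEntryA

theorem pvDict_items (templates : List (String × List (String × List String)))
    (d : PySem.Dict String (List String))
    (hnd : (templates.map Prod.fst).Nodup)
    (hdis : ∀ tp ∈ templates, d.contains tp.1 = false) :
    (templates.foldl pvStepA d).items = d.items ++ pvPhase1 templates := by
  induction templates generalizing d with
  | nil => simp [pvPhase1]
  | cons tp rest ih =>
      rw [List.map_cons, List.nodup_cons] at hnd
      obtain ⟨hhead, hnd'⟩ := hnd
      rw [List.foldl_cons, pvPhase1, List.filterMap_cons]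
      cases hget : (PySem.Dict.mk tp.2).get? "patterns" with
      | none =>
          simp only [pvStepA, pvEntryA, hget]
          exact ih d hnd' (fun q hq => hdis q (by simp [hq]))
      | some patterns =>
          by_cases hn : pvNormA patterns = []
          · simp only [pvStepA, pvEntryA, hget, hn, if_pos rfl, ne_eq, not_true_eq_false,
              if_false, ite_true]
            exact ih d hnd' (fun q hq => hdis q (by simp [hq]))
          · have hc : d.contains tp.1 = false := hdis tp (by simp)
            have hrest : ∀ q ∈ rest, (d.insert tp.1 (pvNormA patterns)).contains q.1 = false := by
              intro q hq
              have h1 : d.contains q.1 = false := hdis q (by simp [hq])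
              have h2 : q.1 ≠ tp.1 := fun he => hhead (he ▸ List.mem_map_of_mem hq)
              simp [PySem.Dict.contains_insert, h1, h2]
            simp only [pvStepA, pvEntryA, hget, hn, if_neg hn, ne_eq, not_false_eq_true, ite_true,
              if_true]
            rw [ih _ hnd' hrest, PySem.Dict.items_insert, hc]
            simp [pvPhase1]
            rfl

-- flat scan over one group of patterns sharing a key
theorem pvFlat_group (text : List Char) (k : String) (ps : List String) (tail : List (String × String)) :
    pvFlatScanB text (ps.map (fun p => (k, p)) ++ tail)
      = if ps.any (fun p => PySem.Chars.isIn p.toList text) then some k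
        else pvFlatScanB text tail := by
  induction ps with
  | nil => simp
  | cons p rest ih =>
      simp only [List.map_cons, List.cons_append, pvFlatScanB, List.any_cons]
      by_cases hm : PySem.Chars.isIn p.toList text = true <;>
        simp [hm, ih, Bool.eq_false_iff.mpr]

-- the flat fallback scan equals A's nested scan of the fallback table
theorem pvFallback_eq (text : List Char) :
    pvFlatScanB text pvFallbackFlatB = pvScanA text pvFallbackA := by
  have hflat : pvFallbackFlatB
      = pvFallbackA.flatMap (fun g => g.2.map (fun p => (g.1, p))) := by rfl
  rw [hflat]
  have : ∀ l : List (String × List String),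
      pvFlatScanB text (l.flatMap (fun g => g.2.map (fun p => (g.1, p)))) = pvScanA text l := by
    intro l
    induction l with
    | nil => rfl
    | cons g rest ih =>
        cases g with
        | mk k ps =>
            rw [List.flatMap_cons, pvFlat_group, pvScanA]
            split <;> simp_all
  exact this pvFallbackA

-- characterization of B's fused loop against A's phase-1 list
theorem pvGoB_eq (text : List Char) (templates : List (String × List (String × List String))) :
    ∀ anyValid : Bool, pvGoB text templates anyValid =
      if anyValid = true ∨ pvPhase1 templates ≠ [] then pvScanA text (pvPhase1 templates)
      else pvFlatScanB text pvFallbackFlatB := by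
  induction templates with
  | nil =>
      intro anyValid
      cases anyValid <;> simp [pvGoB, pvPhase1, pvScanA]
  | cons tp rest ih =>
      intro anyValid
      rw [show pvPhase1 (tp :: rest) = (pvEntryA tp).toList ++ pvPhase1 rest by
        simp [pvPhase1, List.filterMap_cons]; cases pvEntryA tp <;> simp]
      simp only [pvGoB]
      cases hget : (PySem.Dict.mk tp.2).get? "patterns" with
      | none =>
          simp only [pvScanPayloadB, hget, pvEntryA, Option.toList_none, List.nil_append]
          simpa using ih anyValid
      | some patterns =>
          simp only [pvScanPayloadB, hget]
          rw [pvScanPats_eq]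
          by_cases hn : pvNormA patterns = []
          · have hnF : pvNormF patterns = [] := by rw [← pvNorm_eq]; exact hn
            simp only [pvEntryA, hget, hn, if_pos rfl, ite_true, Option.toList_none,
              List.nil_append, hnF]
            simpa using ih anyValid
          · have hnF : ¬ (pvNormF patterns).isEmpty := by
              rw [← pvNorm_eq]; simpa [List.isEmpty_iff] using hn
            simp only [pvEntryA, hget, hn, if_neg hn, ite_false, Option.toList_some]
            cases hm : (pvNormF patterns).any (fun q => PySem.Chars.isIn q.toList text) with
            | true =>
                rw [← pvNorm_eq] at hm
                simp [pvScanA, hm]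
            | false =>
                have hmA : (pvNormA patterns).any (fun q => PySem.Chars.isIn q.toList text) = false := by
                  rw [pvNorm_eq]; exact hm
                rw [ih (anyValid || (false || !(pvNormF patterns).isEmpty))]
                simp [pvScanA, hmA, hnF, Bool.eq_false_iff.mpr hnF]

-- ===== VERDICT (by name: the statement is the Claim_ definition above) =====
theorem match_faq_template_spec : Claim_equal_match_faq_template := by
  intro subject body templates _ hpre
  unfold Spec_match_faq_template match_faq_template match_faq_template_alt
  rw [pvGoB_eq]
  have hitems := pvDict_items templates PySem.Dict.empty hpre
      (fun tp _ => by simp [PySem.Dict.contains_empty])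
  have hempty : (PySem.Dict.empty : PySem.Dict String (List String)).items = [] := rfl
  rw [hempty, List.nil_append] at hitems
  simp only [pvTextA, hitems]
  by_cases hph : pvPhase1 templates = []
  · simp [hph, pvFallback_eq]
  · simp [hph]
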